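-- pv_equiv track=rewrite | github.com/tkf/genrun | genrun.py | indices_to_range
-- ===== SOURCE A (Python) =====
-- def indices_to_range(indices: "typing.Collection") -> str:
--     """
--     Convert a list of integers to the range format for sbatch and qsub.
--
--     >>> indices_to_range([0, 1, 2, 3])
--     '0-3'
--     >>> indices_to_range([0, 10, 11, 12])
--     '0,10-12'
--     >>> indices_to_range([0, 1, 2, 10, 11, 12, 100, 101, 102])
--     '0-2,10-12,100-102'
--
--     See:
--
--     - https://slurm.schedmd.com/sbatch.html
--     - http://docs.adaptivecomputing.com/torque/4-2-7/help.htm#topics/commands/qsub.htm#-t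
--
--     """
--     assert len(indices) == len(set(indices))
--
--     ranges = []
--     it = iter(indices)
--     try:
--         i = next(it)
--     except StopIteration:
--         return ""
--
--     nonempty = True
--     while nonempty:
--         prev = beg = i
--         for i in it:
--             if i != prev + 1:
--                 break
--             prev = i
--         else:
--             nonempty = False
--
--         if beg == prev:
--             ranges.append(str(beg))
--         else:
--             ranges.append("{}-{}".format(beg, prev))
--
--     return ",".join(ranges)
-- ===== SOURCE B (Python) =====
-- def indices_to_range(indices: "typing.Collection") -> str:
--     """Convert a list of integers to the range format for sbatch and qsub."""
--     xs = list(indices)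
--     assert len(xs) == len(set(xs))
--     n = len(xs)
--     starts = [k for k in range(n) if k == 0 or xs[k] != xs[k - 1] + 1]
--     bounds = starts + [n]
--     parts = []
--     for s, e in zip(bounds, bounds[1:]):
--         b, p = xs[s], xs[e - 1]
--         parts.append(str(b) if b == p else "{}-{}".format(b, p))
--     return ",".join(parts)
-- ===== Notes on version B (the rewrite author's own statement) =====
-- stated objective: alternative
-- what changed: Replaces A's iterator-driven nested while/for loop (with break/else and carried iterator state) by an index-based two-pass scheme: first compute the list of run-start positions by filtering range(n) on the break condition, then slice out each run from consecutive boundary pairs via zip.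
import Mathlib
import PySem

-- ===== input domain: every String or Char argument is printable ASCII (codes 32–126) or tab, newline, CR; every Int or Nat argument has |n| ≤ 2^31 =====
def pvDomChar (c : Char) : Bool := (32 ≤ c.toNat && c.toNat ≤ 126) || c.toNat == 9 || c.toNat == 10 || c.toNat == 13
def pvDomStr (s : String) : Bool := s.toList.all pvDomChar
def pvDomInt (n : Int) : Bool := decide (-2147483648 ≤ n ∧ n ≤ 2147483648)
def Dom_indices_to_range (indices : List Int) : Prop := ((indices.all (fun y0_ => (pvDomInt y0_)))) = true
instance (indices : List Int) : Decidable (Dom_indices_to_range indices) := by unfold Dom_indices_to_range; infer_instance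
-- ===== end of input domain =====

-- B replaces A's iterator-driven nested while/for loop by an index-based two-pass scheme
-- (filter range(n) for run starts, then slice runs from boundary pairs); alternative, same cost.


-- ===== PORT A =====
-- the inner 'for i in it: if i != prev+1: break; prev = i' loop:
-- returns (final prev, none) if the iterator was exhausted (for/else), or (prev, some (i, rest)) on break
def pvInnerA (prev : Int) : List Int → Int × Option (Int × List Int)
  | [] => (prev, none)
  | j :: rs => if j ≠ prev + 1 then (prev, some (j, rs)) else pvInnerA j rs

theorem pvInnerA_some_length (it : List Int) : ∀ (prev p j : Int) (rs : List Int),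
    pvInnerA prev it = (p, some (j, rs)) → rs.length < it.length := by
  induction it with
  | nil => intro prev p j rs h; simp [pvInnerA] at h
  | cons y ys ih =>
    intro prev p j rs h
    by_cases hy : y ≠ prev + 1
    · simp [pvInnerA, hy] at h
      simp [h.2.2]
    · simp [pvInnerA, hy] at h
      exact Nat.lt_succ_of_lt (ih _ _ _ _ h)

-- A's outer 'while nonempty' loop, starting a run at beg = i
def pvOuterA (i : Int) (it : List Int) : List String :=
  match h : pvInnerA i it with
  | (prev, none) =>
      [if i = prev then PySem.Int.toStr i else PySem.Int.toStr i ++ "-" ++ PySem.Int.toStr prev]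
  | (prev, some (j, rs)) =>
      (if i = prev then PySem.Int.toStr i else PySem.Int.toStr i ++ "-" ++ PySem.Int.toStr prev)
        :: pvOuterA j rs
termination_by it.length
decreasing_by exact pvInnerA_some_length it i prev j rs h

-- (the 'assert len(indices) == len(set(indices))' raises on duplicates: excluded by Pre_)
def indices_to_range (indices : List Int) : String :=
  match indices with
  | [] => ""
  | i :: it => PySem.Str.join "," (pvOuterA i it)

-- ===== PORT B =====
def pvFmtB (b p : Int) : String :=
  if b = p then PySem.Int.toStr b else PySem.Int.toStr b ++ "-" ++ PySem.Int.toStr p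

-- (B's assert raises on duplicates exactly like A's: excluded by Pre_)
def indices_to_range_alt (indices : List Int) : String :=
  let xs := indices
  let n : Int := xs.length
  let starts := (PySem.List.pyRange 0 n 1).filter
    (fun k => k == 0 || !(PySem.List.pyGetD xs k 0 == PySem.List.pyGetD xs (k - 1) 0 + 1))
  let bounds := starts ++ [n]
  let parts := (bounds.zip (PySem.List.slice bounds (some 1) none)).map
    (fun se => pvFmtB (PySem.List.pyGetD xs se.1 0) (PySem.List.pyGetD xs (se.2 - 1) 0))
  PySem.Str.join "," parts

-- ===== PRECONDITION & SPEC =====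
-- Pre_ excludes exactly the inputs with duplicate elements, on which A's assert raises AssertionError.
def Pre_indices_to_range (indices : List Int) : Prop := indices.Nodup
instance (indices : List Int) : Decidable (Pre_indices_to_range indices) := by
  unfold Pre_indices_to_range; infer_instance
def pvWitness_indices_to_range : List Int := [0, 1, 2, 10]

def Spec_indices_to_range (indices : List Int) (out : String) : Prop := out = indices_to_range_alt indices
instance (indices : List Int) (out : String) : Decidable (Spec_indices_to_range indices out) := by unfold Spec_indices_to_range; infer_instance

-- ===== CLAIM (what is proved, stated in full; the proofs are below) =====
def Claim_equal_indices_to_range : Prop := ∀ (indices : List Int), Dom_indices_to_range indices → Pre_indices_to_range indices → Spec_indices_to_range indices (indices_to_range indices)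

-- ===== LEMMAS AND PROOFS =====

-- reference decomposition: list of (beg, prev) runs
def pvRunsGo (b p : Int) : List Int → List (Int × Int)
  | [] => [(b, p)]
  | y :: ys => if y = p + 1 then pvRunsGo b y ys else (b, p) :: pvRunsGo y y ys

def pvRuns : List Int → List (Int × Int)
  | [] => []
  | x :: t => pvRunsGo x x t

-- length of the consecutive continuation after prev = p
def pvCLen (p : Int) : List Int → Nat
  | [] => 0
  | y :: ys => if y = p + 1 then 1 + pvCLen y ys else 0

def pvBreakP (xs : List Int) (k : Nat) : Bool :=
  k == 0 || !(xs.getD k 0 == xs.getD (k - 1) 0 + 1)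

def pvStarts (xs : List Int) : List Nat := (List.range xs.length).filter (pvBreakP xs)
def pvBounds (xs : List Int) : List Nat := pvStarts xs ++ [xs.length]
def pvSegs (xs : List Int) : List (Int × Int) :=
  ((pvBounds xs).zip ((pvBounds xs).drop 1)).map (fun se => (xs.getD se.1 0, xs.getD (se.2 - 1) 0))

theorem pvOuterA_unfold (i : Int) (it : List Int) :
    pvOuterA i it =
    (match pvInnerA i it with
     | (prev, none) =>
         [if i = prev then PySem.Int.toStr i else PySem.Int.toStr i ++ "-" ++ PySem.Int.toStr prev]
     | (prev, some (j, rs)) =>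
         (if i = prev then PySem.Int.toStr i else PySem.Int.toStr i ++ "-" ++ PySem.Int.toStr prev)
           :: pvOuterA j rs) := by
  rw [pvOuterA.eq_def]
  rcases h : pvInnerA i it with ⟨prev, (_ | ⟨j, rs⟩)⟩ <;> simp [h]

theorem A_side (it : List Int) : ∀ b p : Int,
    (match pvInnerA p it with
     | (prev, none) =>
         [if b = prev then PySem.Int.toStr b else PySem.Int.toStr b ++ "-" ++ PySem.Int.toStr prev]
     | (prev, some (j, rs)) =>
         (if b = prev then PySem.Int.toStr b else PySem.Int.toStr b ++ "-" ++ PySem.Int.toStr prev)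
           :: pvOuterA j rs)
    = (pvRunsGo b p it).map (fun r => pvFmtB r.1 r.2) := by
  induction it with
  | nil => intro b p; simp [pvInnerA, pvRunsGo, pvFmtB]
  | cons y ys ih =>
    intro b p
    by_cases hy : y = p + 1
    · have h1 : pvInnerA p (y :: ys) = pvInnerA y ys := by simp [pvInnerA, hy]
      rw [h1, ih b y]
      simp [pvRunsGo, hy]
    · have h1 : pvInnerA p (y :: ys) = (p, some (y, ys)) := by simp [pvInnerA, hy]
      rw [h1]
      have h2 : pvOuterA y ys = (pvRunsGo y y ys).map (fun r => pvFmtB r.1 r.2) := by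
        rw [pvOuterA_unfold]; exact ih y y
      simp [pvRunsGo, hy, h2, pvFmtB]

theorem outerA_eq_runs (i : Int) (it : List Int) :
    pvOuterA i it = (pvRunsGo i i it).map (fun r => pvFmtB r.1 r.2) := by
  rw [pvOuterA_unfold]; exact A_side it i i

theorem pv_getD_drop (l : List Int) (i j : Nat) : (l.drop i).getD j 0 = l.getD (i + j) 0 := by
  simp [List.getD_eq_getElem?_getD, List.getElem?_drop]

-- k-th element of a consecutive run
theorem pvCLen_le_length (t : List Int) : ∀ p, pvCLen p t ≤ t.length := by
  induction t with
  | nil => intro p; simp [pvCLen]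
  | cons y ys ih =>
    intro p
    by_cases hy : y = p + 1
    · simp only [pvCLen, if_pos hy, List.length_cons]
      have := ih y
      omega
    · simp [pvCLen, hy]

theorem pvCLen_getD (t : List Int) : ∀ p k, k < pvCLen p t → t.getD k 0 = p + 1 + k := by
  induction t with
  | nil => intro p k h; simp [pvCLen] at h
  | cons y ys ih =>
    intro p k h
    by_cases hy : y = p + 1
    · simp only [pvCLen, if_pos hy] at h
      cases k with
      | zero => simpa using hy
      | succ k =>
        have := ih y k (by omega)
        simp only [List.getD_cons_succ, this, hy]
        push_cast; ring
    · simp [pvCLen, hy] at h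
  
theorem pvCLen_break (t : List Int) : ∀ p, pvCLen p t < t.length →
    t.getD (pvCLen p t) 0 ≠ p + 1 + pvCLen p t := by
  induction t with
  | nil => intro p h; simp at h
  | cons y ys ih =>
    intro p h
    by_cases hy : y = p + 1
    · simp only [pvCLen, if_pos hy] at h ⊢
      have hlt : pvCLen y ys < ys.length := by simp only [List.length_cons] at h; omega
      have hne := ih y hlt
      rw [show 1 + pvCLen y ys = pvCLen y ys + 1 by omega, List.getD_cons_succ]
      intro hc
      apply hne
      rw [hc, hy]; push_cast; ring
    · simpa [pvCLen, hy] using hy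

-- run values inside x :: t, for k ≤ pvCLen x t
theorem pv_run_getD (x : Int) (t : List Int) (k : Nat) (hk : k ≤ pvCLen x t) :
    (x :: t).getD k 0 = x + k := by
  cases k with
  | zero => simp
  | succ k =>
    have := pvCLen_getD t x k (by omega)
    simp only [List.getD_cons_succ, this]
    push_cast; ring

theorem pv_run_break (x : Int) (t : List Int) (h : pvCLen x t < t.length) :
    (x :: t).getD (1 + pvCLen x t) 0 ≠ x + (1 + pvCLen x t : Nat) := by
  have := pvCLen_break t x h
  intro hc
  apply this
  rw [show (1 + pvCLen x t) = pvCLen x t + 1 by omega] at hc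
  simp only [List.getD_cons_succ] at hc
  rw [hc]; push_cast; ring

-- starts of range r (the first run) collapse to [0]
theorem pv_starts_first (xs : List Int) (x : Int) (t : List Int) (hxs : xs = x :: t) :
    (List.range (1 + pvCLen x t)).filter (pvBreakP xs) = [0] := by
  rw [show 1 + pvCLen x t = pvCLen x t + 1 by omega, List.range_succ_eq_map]
  rw [List.filter_cons_of_pos (by simp [pvBreakP])]
  have : ((List.range (pvCLen x t)).map Nat.succ).filter (pvBreakP xs) = [] := by
    rw [List.filter_eq_nil_iff]
    intro k hk
    obtain ⟨j, hj, rfl⟩ := List.mem_map.mp hk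
    have hjlt := List.mem_range.mp hj
    simp only [pvBreakP, hxs, Nat.succ_eq_add_one]
    have h1 : (x :: t).getD (j + 1) 0 = x + ((j + 1 : Nat) : Int) := pv_run_getD x t (j + 1) (by omega)
    have h2 : (x :: t).getD (j + 1 - 1) 0 = x + ((j : Nat) : Int) := by
      simpa using pv_run_getD x t j (by omega)
    rw [h1, h2]
    have h3 : x + ((j + 1 : Nat) : Int) = x + ((j : Nat) : Int) + 1 := by push_cast; ring
    rw [h3]
    simp
  rw [this]

theorem pv_break_shift (xs : List Int) (x : Int) (t : List Int) (hxs : xs = x :: t)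
    (j : Nat) (hj : j < (xs.drop (1 + pvCLen x t)).length) :
    pvBreakP xs (1 + pvCLen x t + j) = pvBreakP (xs.drop (1 + pvCLen x t)) j := by
  set r := 1 + pvCLen x t with hr
  cases j with
  | zero =>
    have hrlen : r < xs.length := by
      have := List.length_drop (l := xs) (i := r)
      omega
    have hb : pvBreakP (xs.drop r) 0 = true := by simp [pvBreakP]
    rw [hb]
    have hne : xs.getD r 0 ≠ xs.getD (r - 1) 0 + 1 := by
      have hgd : xs.getD (r - 1) 0 = x + ((pvCLen x t : Nat) : Int) := by
        rw [hxs, show r - 1 = pvCLen x t by omega]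
        exact pv_run_getD x t _ (le_refl _)
      have hclt : pvCLen x t < t.length := by
        rw [hxs] at hrlen; simp only [List.length_cons] at hrlen; omega
      have hbr := pv_run_break x t hclt
      rw [hxs]; rw [hxs] at hgd
      intro hc
      apply hbr
      rw [show (1 + pvCLen x t) = r from hr.symm, hc, hgd, hr]
      push_cast; ring
    simp only [Nat.add_zero, pvBreakP, Bool.or_eq_true, beq_iff_eq, Bool.not_eq_true',
      beq_eq_false_iff_ne, ne_eq]
    right
    exact hne
  | succ j =>
    simp only [pvBreakP]
    have e1 : xs.getD (r + (j + 1)) 0 = (xs.drop r).getD (j + 1) 0 := (pv_getD_drop xs r (j + 1)).symm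
    have e2 : xs.getD (r + (j + 1) - 1) 0 = (xs.drop r).getD (j + 1 - 1) 0 := by
      rw [show r + (j + 1) - 1 = r + j by omega, show j + 1 - 1 = j by omega, pv_getD_drop]
    rw [e1, e2]
    have h0 : (r + (j + 1) == 0) = (j + 1 == 0) := by simp
    rw [h0]

theorem pv_starts_decomp (xs : List Int) (x : Int) (t : List Int) (hxs : xs = x :: t) :
    pvStarts xs = 0 :: (pvStarts (xs.drop (1 + pvCLen x t))).map ((1 + pvCLen x t) + ·) := by
  set r := 1 + pvCLen x t with hr
  have hrle : r ≤ xs.length := by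
    rw [hxs]; simp [hr]
    have := pvCLen_le_length t x
    omega
  have hlen : xs.length = r + (xs.drop r).length := by
    rw [List.length_drop]; omega
  unfold pvStarts
  rw [hlen, List.range_add, List.filter_append]
  have h1 : (List.range r).filter (pvBreakP xs) = [0] := by
    rw [hr]; exact pv_starts_first xs x t hxs
  rw [h1, List.filter_map, List.singleton_append]
  congr 2
  apply List.filter_congr
  intro k hk
  have hklt := List.mem_range.mp hk
  have := pv_break_shift xs x t hxs k hklt
  simpa [Function.comp] using this

theorem pv_bounds_decomp (xs : List Int) (x : Int) (t : List Int) (hxs : xs = x :: t) :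
    pvBounds xs = 0 :: (pvBounds (xs.drop (1 + pvCLen x t))).map ((1 + pvCLen x t) + ·) := by
  set r := 1 + pvCLen x t with hr
  have hrle : r ≤ xs.length := by
    rw [hxs]; simp [hr]
    have := pvCLen_le_length t x
    omega
  unfold pvBounds
  rw [pv_starts_decomp xs x t hxs, List.map_append]
  simp only [List.map_cons, List.map_nil, List.cons_append, List.length_drop]
  congr 3
  omega

-- pvBounds always begins with 0
theorem pv_bounds_head (l : List Int) : ∃ bs, pvBounds l = 0 :: bs := by
  cases l with
  | nil => exact ⟨[], rfl⟩
  | cons y t =>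
    unfold pvBounds pvStarts
    simp only [List.length_cons, List.range_succ_eq_map]
    rw [List.filter_cons_of_pos (by simp [pvBreakP])]
    exact ⟨_, rfl⟩

-- every later boundary is positive
theorem pv_bounds_tail_pos (l : List Int) : ∀ e ∈ (pvBounds l).drop 1, 1 ≤ e := by
  cases l with
  | nil => intro e he; simp [pvBounds, pvStarts] at he
  | cons y t =>
    intro e he
    unfold pvBounds pvStarts at he
    simp only [List.length_cons, List.range_succ_eq_map] at he
    rw [List.filter_cons_of_pos (by simp [pvBreakP])] at he
    simp only [List.cons_append, List.drop_one, List.tail_cons] at he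
    rcases List.mem_append.mp he with h | h
    · obtain ⟨j, _, rfl⟩ := List.mem_map.mp (List.mem_of_mem_filter h)
      omega
    · simp at h; omega

theorem pvRunsGo_decomp (t : List Int) : ∀ b p, pvRunsGo b p t = (b, p + pvCLen p t) :: pvRuns (t.drop (pvCLen p t)) := by
  induction t with
  | nil => intro b p; simp [pvRunsGo, pvCLen, pvRuns]
  | cons y ys ih =>
    intro b p
    by_cases hy : y = p + 1
    · simp only [pvRunsGo, pvCLen, if_pos hy, ih b y]
      congr 2
      · rw [hy]; push_cast; ring
      · rw [show 1 + pvCLen y ys = pvCLen y ys + 1 by omega]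
        simp
    · simp [pvRunsGo, pvCLen, hy, pvRuns]

theorem segs_eq_runs (xs : List Int) : pvSegs xs = pvRuns xs := by
  induction hn : xs.length using Nat.strong_induction_on generalizing xs with
  | _ n ih =>
    cases xs with
    | nil => simp [pvSegs, pvBounds, pvStarts, pvRuns]
    | cons x t =>
      set r := 1 + pvCLen x t with hr
      set ys := (x :: t).drop r with hys
      have hylen : ys.length < n := by
        rw [hys, List.length_drop]
        have h1 := pvCLen_le_length t x
        simp only [List.length_cons] at hn ⊢
        omega
      have hIH : pvSegs ys = pvRuns ys := ih ys.length hylen ys rfl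
      have hys' : ys = t.drop (pvCLen x t) := by
        rw [hys, hr, show 1 + pvCLen x t = pvCLen x t + 1 by omega]
        exact List.drop_succ_cons
      obtain ⟨bs, hbs⟩ := pv_bounds_head ys
      unfold pvSegs
      rw [pv_bounds_decomp (x :: t) x t rfl, ← hr, ← hys, hbs]
      simp only [List.map_cons, List.drop_one, List.tail_cons, List.zip_cons_cons]
      rw [pvRuns, pvRunsGo_decomp t x x, ← hys']
      have hfirst : ((x :: t).getD 0 0, (x :: t).getD (r + 0 - 1) 0) = (x, x + pvCLen x t) := by
        simp only [List.getD_cons_zero, Nat.add_zero, Prod.mk.injEq, true_and]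
        rw [show r - 1 = pvCLen x t by omega]
        exact pv_run_getD x t _ (le_refl _)
      rw [hfirst]
      congr 1
      -- the shifted tail equals pvSegs ys
      have hzip : ((r + 0) :: bs.map (r + ·)).zip (bs.map (r + ·))
          = ((0 :: bs).zip bs).map (fun se => (r + se.1, r + se.2)) := by
        rw [show ((r + 0) :: bs.map (r + ·)) = (0 :: bs).map (r + ·) by simp, List.zip_map]
        simp [Prod.map]
      rw [hzip, List.map_map, ← hIH]
      unfold pvSegs
      rw [hbs]
      simp only [List.drop_one, List.tail_cons]
      apply List.map_congr_left
      intro ⟨s, e⟩ hmem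
      have he : e ∈ bs := (List.of_mem_zip hmem).2
      have hepos : 1 ≤ e := by
        apply pv_bounds_tail_pos ys
        rw [hbs]; simpa using he
      simp only [Function.comp_apply]
      have e1 : (x :: t).getD (r + s) 0 = ys.getD s 0 := by rw [hys, pv_getD_drop]
      have e2 : (x :: t).getD (r + e - 1) 0 = ys.getD (e - 1) 0 := by
        rw [hys, pv_getD_drop]
        congr 1
        omega
      rw [e1, e2]

theorem pvBreak_cast (xs : List Int) (k : Nat) :
    (((k : Nat) : Int) == 0
      || !(PySem.List.pyGetD xs ((k : Nat) : Int) 0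
            == PySem.List.pyGetD xs (((k : Nat) : Int) - 1) 0 + 1)) = pvBreakP xs k := by
  cases k with
  | zero => simp [pvBreakP]
  | succ k =>
    have h2 : (((k + 1 : Nat) : Int)) - 1 = ((k : Nat) : Int) := by omega
    rw [h2]
    simp only [PySem.List.pyGetD_natCast, pvBreakP, Nat.add_sub_cancel]
    rw [show ((((k + 1 : Nat) : Int)) == 0) = false by simp; omega,
      show (((k + 1 : Nat)) == 0) = false by simp]

theorem B_side (xs : List Int) :
    indices_to_range_alt xs = PySem.Str.join "," ((pvSegs xs).map (fun r => pvFmtB r.1 r.2)) := by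
  unfold indices_to_range_alt
  dsimp only
  have hrange : PySem.List.pyRange 0 (xs.length : Int) 1
      = (List.range xs.length).map (fun k : Nat => (k : Int)) := by
    rw [PySem.List.pyRange_one]
    simp
  rw [hrange]
  have hfilter : ((List.range xs.length).map (fun k : Nat => (k : Int))).filter
        (fun k => k == 0 || !(PySem.List.pyGetD xs k 0 == PySem.List.pyGetD xs (k - 1) 0 + 1))
      = (pvStarts xs).map (fun k : Nat => (k : Int)) := by
    rw [List.filter_map]
    unfold pvStarts
    congr 1
    apply List.filter_congr
    intro k _
    simpa [Function.comp] using pvBreak_cast xs k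
  rw [hfilter]
  have hbounds : (pvStarts xs).map (fun k : Nat => (k : Int)) ++ [(xs.length : Int)]
      = (pvBounds xs).map (fun k : Nat => (k : Int)) := by
    unfold pvBounds
    rw [List.map_append]
    rfl
  rw [hbounds]
  have hslice : PySem.List.slice ((pvBounds xs).map (fun k : Nat => (k : Int))) (some 1) none
      = ((pvBounds xs).drop 1).map (fun k : Nat => (k : Int)) := by
    rw [PySem.List.slice_from _ (by omega : (0:Int) ≤ 1)]
    simp
  rw [hslice]
  have hzip : (((pvBounds xs).map (fun k : Nat => (k : Int))).zip
        (((pvBounds xs).drop 1).map (fun k : Nat => (k : Int))))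
      = ((pvBounds xs).zip ((pvBounds xs).drop 1)).map
          (fun se => ((se.1 : Int), (se.2 : Int))) := by
    rw [List.zip_map]
    simp [Prod.map]
  rw [hzip, List.map_map]
  unfold pvSegs
  rw [List.map_map]
  congr 1
  apply List.map_congr_left
  intro ⟨s, e⟩ hmem
  have he : e ∈ (pvBounds xs).drop 1 := (List.of_mem_zip hmem).2
  have hepos : 1 ≤ e := pv_bounds_tail_pos xs e he
  simp only [Function.comp_apply]
  have h2 : ((e : Nat) : Int) - 1 = ((e - 1 : Nat) : Int) := by
    push_cast [hepos]
    omega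
  rw [h2]
  simp only [PySem.List.pyGetD_natCast]

-- ===== VERDICT (by name: the statement is the Claim_ definition above) =====
theorem indices_to_range_spec : Claim_equal_indices_to_range := by
  intro indices _ _
  unfold Spec_indices_to_range
  rw [B_side, segs_eq_runs]
  cases indices with
  | nil => rfl
  | cons x t =>
    simp only [indices_to_range, pvRuns]
    rw [outerA_eq_runs]
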